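-- pv_equiv track=rewrite | github.com/elaada/kpi-decision-support-tool | kpi-app.py | suggest_mapping
-- ===== SOURCE A (Python) =====
-- def suggest_mapping(columns, required_fields):
--     keyword_map = {
--         "date": [
--             "date", "month", "period", "tarih", "ay",
--             "report date", "invoice date", "billing date"
--         ],
--         "activity_date": [
--             "activity_date", "activity date", "usage date",
--             "event date", "activity", "usage", "date"
--         ],
--         "invoice_amount": [
--             "invoice_amount", "invoice amount", "revenue", "amount",
--             "sales", "ciro", "gelir", "net revenue", "mrr"
--         ],
--         "customer_id": [
--             "customer_id", "customer id", "client_id", "client id",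
--             "account_id", "account id", "user_id", "user id",
--             "customer", "client", "account", "user"
--         ]
--     }
--
--     suggestions = {}
--     lower_columns = {col: str(col).lower().strip() for col in columns}
--
--     for field in required_fields:
--         suggestions[field] = None
--         for original_col, lower_col in lower_columns.items():
--             if any(keyword in lower_col for keyword in keyword_map.get(field, [])):
--                 suggestions[field] = original_col
--                 break
--
--     return suggestions
-- ===== SOURCE B (Python) =====
-- def suggest_mapping(columns, required_fields):
--     keyword_map = {
--         "date": [
--             "date", "month", "period", "tarih", "ay",
--             "report date", "invoice date", "billing date"
--         ],
--         "activity_date": [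
--             "activity_date", "activity date", "usage date",
--             "event date", "activity", "usage", "date"
--         ],
--         "invoice_amount": [
--             "invoice_amount", "invoice amount", "revenue", "amount",
--             "sales", "ciro", "gelir", "net revenue", "mrr"
--         ],
--         "customer_id": [
--             "customer_id", "customer id", "client_id", "client id",
--             "account_id", "account id", "user_id", "user id",
--             "customer", "client", "account", "user"
--         ]
--     }
--
--     # single pass over the columns; a still-None field takes the first column
--     # (in column order) whose lowered/stripped text contains one of its keywords
--     suggestions = {field: None for field in required_fields}
--     for col in columns:
--         text = str(col).lower().strip()
--         suggestions = {
--             field: (col if v is None and any(k in text for k in keyword_map.get(field, [])) else v)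
--             for field, v in suggestions.items()
--         }
--     return suggestions
-- ===== Notes on version B (the rewrite author's own statement) =====
-- stated objective: alternative
-- what changed: Inverts the loop nesting: instead of scanning the column dict once per required field with a break, B initializes every field to None and makes a single pass over the columns, filling each still-None field whose keywords match that column; duplicate columns need no dedup dict because duplicates carry the same text.
import Mathlib
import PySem

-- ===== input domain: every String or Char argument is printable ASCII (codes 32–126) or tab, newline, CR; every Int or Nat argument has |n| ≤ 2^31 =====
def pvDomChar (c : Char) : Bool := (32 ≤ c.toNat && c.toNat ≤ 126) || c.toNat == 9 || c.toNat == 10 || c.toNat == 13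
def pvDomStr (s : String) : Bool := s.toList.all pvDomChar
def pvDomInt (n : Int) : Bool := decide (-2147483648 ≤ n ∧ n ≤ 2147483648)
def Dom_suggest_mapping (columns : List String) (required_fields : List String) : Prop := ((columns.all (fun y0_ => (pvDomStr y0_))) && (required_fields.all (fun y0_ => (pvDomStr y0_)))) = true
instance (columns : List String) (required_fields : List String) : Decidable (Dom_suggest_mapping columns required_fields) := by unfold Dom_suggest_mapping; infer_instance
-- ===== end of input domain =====

-- B inverts the loop nesting (one pass over columns, fields start at None and keep their first match); same return value.

-- shared literal context: the keyword table, str(col).lower().strip(), and 'any(k in text for k in kws)'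
def pvKeywordMap : PySem.Dict String (List String) :=
  PySem.Dict.ofList
    [ ("date", ["date", "month", "period", "tarih", "ay", "report date", "invoice date", "billing date"]),
      ("activity_date", ["activity_date", "activity date", "usage date", "event date", "activity", "usage", "date"]),
      ("invoice_amount", ["invoice_amount", "invoice amount", "revenue", "amount", "sales", "ciro", "gelir", "net revenue", "mrr"]),
      ("customer_id", ["customer_id", "customer id", "client_id", "client id", "account_id", "account id", "user_id", "user id", "customer", "client", "account", "user"]) ]

def pvLower (s : String) : String := PySem.Str.strip (PySem.Str.lower s)

def pvHit (kws : List String) (text : String) : Bool := kws.any (fun k => PySem.Str.isIn k text)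

-- ===== PORT A =====
-- inner 'for original_col, lower_col in lower_columns.items(): … break'
def aInner (kws : List String) : List (String × String) → Option String
  | [] => none
  | (c, lc) :: rest => if pvHit kws lc then some c else aInner kws rest

def suggest_mapping (columns : List String) (required_fields : List String) : List (String × Option String) :=
  let lower_columns : PySem.Dict String String :=
    columns.foldl (fun d col => d.insert col (pvLower col)) PySem.Dict.empty
  (required_fields.foldl (fun d field =>
      let d := d.insert field (none : Option String)
      match aInner (pvKeywordMap.getD field []) lower_columns.items with
      | some c => d.insert field (some c)
      | none => d) PySem.Dict.empty).items

-- ===== PORT B =====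
-- one column: rebuild the suggestion entries, filling still-None matching fields with this column
def bStep (col : String) (entries : List (String × Option String)) : List (String × Option String) :=
  let text := pvLower col
  entries.map (fun p => if p.2 = none ∧ pvHit (pvKeywordMap.getD p.1 []) text then (p.1, some col) else p)

def suggest_mapping_alt (columns : List String) (required_fields : List String) : List (String × Option String) :=
  columns.foldl (fun entries col => bStep col entries)
    ((PySem.List.dedup required_fields).map (fun field => (field, (none : Option String))))

-- ===== PRECONDITION & SPEC =====
def Spec_suggest_mapping (columns : List String) (required_fields : List String) (out : List (String × Option String)) : Prop := out = suggest_mapping_alt columns required_fields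
instance (columns : List String) (required_fields : List String) (out : List (String × Option String)) : Decidable (Spec_suggest_mapping columns required_fields out) := by unfold Spec_suggest_mapping; infer_instance

-- ===== CLAIM (what is proved, stated in full; the proofs are below) =====
def Claim_equal_suggest_mapping : Prop := ∀ (columns : List String) (required_fields : List String), Dom_suggest_mapping columns required_fields → Spec_suggest_mapping columns required_fields (suggest_mapping columns required_fields)

-- ===== LEMMAS AND PROOFS =====

-- a foldl of inserts whose value is a function of the key builds the dedup'd assoc list
lemma dict_fold_items {ν : Type} (val : String → ν) (l : List String) :
    ∀ (s : List String), s.Nodup →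
      (l.foldl (fun d c => PySem.Dict.insert d c (val c))
          (PySem.Dict.mk (s.map (fun c => (c, val c))))).items
        = (PySem.Set.update s l).map (fun c => (c, val c)) := by
  induction l with
  | nil => intro s _; simp [PySem.Set.update]
  | cons x l ih =>
    intro s hs
    have hkeys : (PySem.Dict.mk (s.map (fun c => (c, val c)))).keys = s := by
      simp [PySem.Dict.keys, List.map_map, Function.comp_def]
    have hcontains : (PySem.Dict.mk (s.map (fun c => (c, val c)))).contains x = decide (x ∈ s) := by
      rw [PySem.Dict.contains_eq_decide_mem_keys, hkeys]
    by_cases hx : x ∈ s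
    · have h1 : (PySem.Dict.mk (s.map (fun c => (c, val c)))).insert x (val x)
          = PySem.Dict.mk (s.map (fun c => (c, val c))) := by
        apply PySem.Dict.ext
        rw [PySem.Dict.items_insert_of_contains _ (val x) (by simp [hcontains, hx])]
        simp only [List.map_map]
        apply List.map_congr_left
        intro c _
        by_cases hc : c = x <;> simp [hc]
      have h2 : PySem.Set.add s x = s := by simp [PySem.Set.add, PySem.Set.contains, hx]
      simp only [List.foldl_cons, PySem.Set.update, h1]
      have := ih s hs
      simpa [PySem.Set.update, h2] using this
    · have h1 : ((PySem.Dict.mk (s.map (fun c => (c, val c)))).insert x (val x)).items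
          = (s ++ [x]).map (fun c => (c, val c)) := by
        rw [PySem.Dict.items_insert_of_not_contains _ (val x) (by simp [hcontains, hx])]
        simp
      have h2 : PySem.Set.add s x = s ++ [x] := by
        simp [PySem.Set.add, PySem.Set.contains, hx]
      have hnodup : (s ++ [x]).Nodup := by
        rw [List.nodup_append]
        refine ⟨hs, List.nodup_singleton x, ?_⟩
        intro a ha b hb
        simp only [List.mem_singleton] at hb
        subst hb
        exact fun e => hx (e ▸ ha)
      simp only [List.foldl_cons, PySem.Set.update]
      have key : (PySem.Dict.mk (s.map (fun c => (c, val c)))).insert x (val x)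
          = PySem.Dict.mk ((s ++ [x]).map (fun c => (c, val c))) := by
        apply PySem.Dict.ext; rw [h1]
      rw [key]
      have := ih (s ++ [x]) hnodup
      simpa [PySem.Set.update, h2] using this

lemma dict_fold_items_empty {ν : Type} (val : String → ν) (l : List String) :
    (l.foldl (fun d c => PySem.Dict.insert d c (val c)) PySem.Dict.empty).items
      = (PySem.List.dedup l).map (fun c => (c, val c)) := by
  have := dict_fold_items val l [] (by simp)
  simpa [PySem.Dict.empty, PySem.Set.update, PySem.List.dedup_eq_ofList, PySem.Set.ofList_eq_foldl] using this

-- A's inner break-loop over (col, lowered) pairs is a find? over the columns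
lemma aInner_eq_find (kws : List String) (S : List String) :
    aInner kws (S.map (fun c => (c, pvLower c))) = S.find? (fun c => pvHit kws (pvLower c)) := by
  induction S with
  | nil => rfl
  | cons c S ih =>
    by_cases h : pvHit kws (pvLower c) <;> simp [aInner, h, ih]

-- find? through the Set-building fold: the first distinct hit is the first hit
lemma find?_foldl_add (p : String → Bool) (l : List String) :
    ∀ (s : List String), List.find? p (l.foldl PySem.Set.add s)
      = (List.find? p s).orElse (fun _ => List.find? p l) := by
  induction l with
  | nil => intro s; cases h : List.find? p s <;> simp [Option.orElse, h]
  | cons x l ih =>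
    intro s
    rw [List.foldl_cons, ih]
    by_cases hx : x ∈ s
    · have hadd : PySem.Set.add s x = s := by simp [PySem.Set.add, PySem.Set.contains, hx]
      rw [hadd]
      by_cases hpx : p x
      · obtain ⟨y, hy, hpy⟩ : ∃ y ∈ s, p y := ⟨x, hx, hpx⟩
        have hsome : (List.find? p s).isSome := List.find?_isSome.2 ⟨y, hy, hpy⟩
        obtain ⟨z, hz⟩ := Option.isSome_iff_exists.1 hsome
        simp [hz, Option.orElse]
      · simp [hpx]
    · have hadd : PySem.Set.add s x = s ++ [x] := by simp [PySem.Set.add, PySem.Set.contains, hx]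
      rw [hadd, List.find?_append]
      cases h : List.find? p s <;> by_cases hpx : p x <;>
        simp [Option.orElse, hpx]

lemma find?_dedup (p : String → Bool) (l : List String) :
    List.find? p (PySem.List.dedup l) = List.find? p l := by
  rw [PySem.List.dedup_eq_ofList, PySem.Set.ofList_eq_foldl, find?_foldl_add]
  simp [Option.orElse]

-- B's column pass leaves each entry's first match
lemma bfold (cs : List String) :
    ∀ (entries : List (String × Option String)),
      cs.foldl (fun e col => bStep col e) entries
        = entries.map (fun p =>
            (p.1, p.2.orElse (fun _ => cs.find? (fun c => pvHit (pvKeywordMap.getD p.1 []) (pvLower c))))) := by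
  induction cs with
  | nil =>
    intro entries
    simp only [List.foldl_nil, List.find?_nil]
    conv_lhs => rw [← List.map_id entries]
    apply List.map_congr_left
    intro p _
    obtain ⟨f, v⟩ := p
    cases v <;> simp [Option.orElse]
  | cons c cs ih =>
    intro entries
    rw [List.foldl_cons, ih]
    simp only [bStep, List.map_map]
    apply List.map_congr_left
    intro p _
    by_cases h2 : p.2 = none
    · by_cases hm : pvHit (pvKeywordMap.getD p.1 []) (pvLower c) <;>
        simp [h2, hm, Function.comp, Option.orElse]
    · obtain ⟨a, ha⟩ := Option.ne_none_iff_exists'.1 h2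
      simp [ha, Function.comp, Option.orElse]

-- ===== VERDICT (by name: the statement is the Claim_ definition above) =====
theorem suggest_mapping_spec : Claim_equal_suggest_mapping := by
  intro columns required_fields _
  unfold Spec_suggest_mapping suggest_mapping suggest_mapping_alt
  -- A's step collapses to a single insert of the field's value
  have hstep : (fun (d : PySem.Dict String (Option String)) field =>
        let d := d.insert field (none : Option String)
        match aInner (pvKeywordMap.getD field [])
            (columns.foldl (fun d col => d.insert col (pvLower col)) PySem.Dict.empty).items with
        | some c => d.insert field (some c)
        | none => d)
      = (fun (d : PySem.Dict String (Option String)) field =>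
          d.insert field (aInner (pvKeywordMap.getD field [])
            (columns.foldl (fun d col => d.insert col (pvLower col)) PySem.Dict.empty).items)) := by
    funext d field
    cases h : aInner (pvKeywordMap.getD field [])
        (columns.foldl (fun d col => d.insert col (pvLower col)) PySem.Dict.empty).items with
    | none => simp
    | some c => simp [PySem.Dict.insert_insert_self]
  simp only []
  rw [hstep, dict_fold_items_empty
        (fun field => aInner (pvKeywordMap.getD field [])
          (columns.foldl (fun d col => d.insert col (pvLower col)) PySem.Dict.empty).items),
      bfold]
  rw [List.map_map]
  apply List.map_congr_left
  intro field _
  have hlc : (columns.foldl (fun d col => d.insert col (pvLower col)) PySem.Dict.empty).items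
      = (PySem.List.dedup columns).map (fun c => (c, pvLower c)) :=
    dict_fold_items_empty pvLower columns
  simp only [Function.comp, hlc, aInner_eq_find, find?_dedup, Option.orElse]
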